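-- pv_equiv track=rewrite | github.com/Appolloyon/Rediting | polyt.py | compare_seqs
-- ===== SOURCE A (Python) =====
-- def compare_seqs(seq1, seq2):
--     """compare substrings to determine start of alignment"""
--     equal = 0
--     for i, (r1, r2) in enumerate(zip(seq1, seq2)):
--         if i == 0:  #terminal residue
--             if r1 != '-' and r2 != '-':  #neither should be a gap
--                 if r1 == r2:
--                     equal += 1
--                 else:
--                     pass
--             else:
--                 return False
--         else:  #other residues
--             if r1 == r2:
--                 equal += 1
--             else:
--                 pass
--     if equal >= 7:  #arbitrary threshold
--         return True
--     else:
--         return False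
-- ===== SOURCE B (Python) =====
-- def compare_seqs(seq1, seq2):
--     """compare substrings to determine start of alignment"""
--     if seq1 and seq2 and (seq1[0] == '-' or seq2[0] == '-'):
--         return False
--     return _has_matches(seq1, seq2, 7)
--
-- def _has_matches(seq1, seq2, need):
--     # recursive countdown: succeed as soon as `need` matches have been seen
--     if need == 0:
--         return True
--     if not seq1 or not seq2:
--         return False
--     return _has_matches(seq1[1:], seq2[1:], need - (seq1[0] == seq2[0]))
-- ===== Notes on version B (the rewrite author's own statement) =====
-- stated objective: alternative
-- what changed: Replaces the indexed counting loop (accumulate all matches, compare to 7 at the end) with an upfront terminal-gap guard plus a recursive countdown helper that decrements a needed-matches counter and short-circuits to True as soon as 7 matches are found.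
import Mathlib
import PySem

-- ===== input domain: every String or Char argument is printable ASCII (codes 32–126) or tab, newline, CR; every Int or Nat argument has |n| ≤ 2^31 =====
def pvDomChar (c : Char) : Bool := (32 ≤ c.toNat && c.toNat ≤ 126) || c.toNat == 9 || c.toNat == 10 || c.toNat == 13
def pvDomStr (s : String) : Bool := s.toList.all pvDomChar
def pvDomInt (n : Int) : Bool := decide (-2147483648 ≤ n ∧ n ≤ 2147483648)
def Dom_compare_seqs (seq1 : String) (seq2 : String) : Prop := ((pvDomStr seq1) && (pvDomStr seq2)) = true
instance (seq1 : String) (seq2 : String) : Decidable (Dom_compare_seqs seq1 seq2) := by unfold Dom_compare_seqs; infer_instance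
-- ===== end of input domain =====

-- B replaces A's indexed counting loop by a terminal-gap guard plus a recursive needed-matches countdown that returns True as soon as 7 matches are seen (objective: alternative).


-- ===== PORT A =====
-- A's loop over enumerate(zip(seq1, seq2)); `none` models the early `return False`.
def compareSeqsLoopA : List (Char × Char) → Nat → Int → Option Int
  | [], _, equal => some equal
  | (r1, r2) :: rest, i, equal =>
    if i == 0 then
      if r1 != '-' && r2 != '-' then
        compareSeqsLoopA rest (i + 1) (if r1 == r2 then equal + 1 else equal)
      else
        none
    else
      compareSeqsLoopA rest (i + 1) (if r1 == r2 then equal + 1 else equal)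

def compare_seqs (seq1 : String) (seq2 : String) : Bool :=
  match compareSeqsLoopA (seq1.toList.zip seq2.toList) 0 0 with
  | none => false
  | some equal => equal ≥ 7

-- ===== PORT B =====
-- _has_matches: countdown of the matches still needed; True as soon as it reaches 0.
def hasMatchesB : List Char → List Char → Nat → Bool
  | _, _, 0 => true
  | [], _, _ + 1 => false
  | _ :: _, [], _ + 1 => false
  | a :: t1, b :: t2, n + 1 => hasMatchesB t1 t2 ((n + 1) - (if a == b then 1 else 0))

def compare_seqs_alt (seq1 : String) (seq2 : String) : Bool :=
  match seq1.toList, seq2.toList with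
  | a :: _, b :: _ =>
    if a == '-' || b == '-' then false
    else hasMatchesB seq1.toList seq2.toList 7
  | _, _ => hasMatchesB seq1.toList seq2.toList 7

-- ===== PRECONDITION & SPEC =====
def Spec_compare_seqs (seq1 : String) (seq2 : String) (out : Bool) : Prop := out = compare_seqs_alt seq1 seq2
instance (seq1 : String) (seq2 : String) (out : Bool) : Decidable (Spec_compare_seqs seq1 seq2 out) := by unfold Spec_compare_seqs; infer_instance

-- ===== CLAIM (what is proved, stated in full; the proofs are below) =====
def Claim_equal_compare_seqs : Prop := ∀ (seq1 : String) (seq2 : String), Dom_compare_seqs seq1 seq2 → Spec_compare_seqs seq1 seq2 (compare_seqs seq1 seq2)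

-- ===== LEMMAS AND PROOFS =====
-- number of matching pairs, as a Nat
def countEq : List (Char × Char) → Nat
  | [] => 0
  | (a, b) :: rest => (if a == b then 1 else 0) + countEq rest

-- B's countdown succeeds iff the matches available meet the countdown.
theorem hasMatchesB_eq (l1 l2 : List Char) (need : Nat) :
    hasMatchesB l1 l2 need = decide (need ≤ countEq (l1.zip l2)) := by
  induction l1 generalizing l2 need with
  | nil => cases need <;> simp [hasMatchesB, countEq]
  | cons a t1 ih =>
    cases l2 with
    | nil => cases need <;> simp [hasMatchesB, countEq]
    | cons b t2 =>
      cases need with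
      | zero => simp [hasMatchesB]
      | succ n =>
        simp only [hasMatchesB, List.zip_cons_cons, countEq, ih, decide_eq_decide]
        cases h : (a == b) <;> simp <;> omega

-- At any index ≠ 0, A's loop never returns early and just accumulates the match count.
theorem loopA_pos (ps : List (Char × Char)) (i : Nat) (equal : Int) (hi : i ≠ 0) :
    compareSeqsLoopA ps i equal = some (equal + (countEq ps : Int)) := by
  induction ps generalizing i equal with
  | nil => simp [compareSeqsLoopA, countEq]
  | cons p rest ih =>
    obtain ⟨r1, r2⟩ := p
    have hi' : (i == 0) = false := by simpa using hi
    simp only [compareSeqsLoopA, hi', Bool.false_eq_true, if_false]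
    rw [ih _ _ (Nat.succ_ne_zero i)]
    simp only [countEq, Option.some.injEq]
    split <;> push_cast <;> ring

-- ===== VERDICT (by name: the statement is the Claim_ definition above) =====
theorem compare_seqs_spec : Claim_equal_compare_seqs := by
  intro seq1 seq2 _
  unfold Spec_compare_seqs compare_seqs compare_seqs_alt
  rcases h1 : seq1.toList with _ | ⟨a, t1⟩ <;> rcases h2 : seq2.toList with _ | ⟨b, t2⟩ <;>
    simp only [List.zip_nil_left, List.zip_nil_right, List.zip_cons_cons]
  · simp [compareSeqsLoopA, hasMatchesB_eq, countEq]
  · simp [compareSeqsLoopA, hasMatchesB_eq, countEq]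
  · simp [compareSeqsLoopA, hasMatchesB_eq, countEq]
  · cases hgap : (a != '-' && b != '-') with
    | false =>
      have hor : (a == '-' || b == '-') = true := by
        simp only [bne] at hgap
        revert hgap; cases a == '-' <;> cases b == '-' <;> simp
      simp [compareSeqsLoopA, hgap, hor]
    | true =>
      have hor : (a == '-' || b == '-') = false := by
        simp only [bne] at hgap
        revert hgap; cases a == '-' <;> cases b == '-' <;> simp
      simp only [compareSeqsLoopA, hgap, hor, Bool.false_eq_true, if_false, if_true,
        beq_self_eq_true]
      rw [loopA_pos _ 1 _ one_ne_zero, hasMatchesB_eq]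
      change decide (_ ≥ (7:Int)) = _
      simp only [List.zip_cons_cons, countEq, ge_iff_le, decide_eq_decide]
      split <;> push_cast <;> omega
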